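-- pv_equiv track=rewrite | github.com/LibCity/Bigscity-LibCity-Datasets | bikedc.py | get_data_url_month
-- ===== SOURCE A (Python) =====
-- def get_data_url_month(input_dir_flow, start_year, start_month, end_year, end_month):
--     res = []
--     pattern_month = input_dir_flow + "/%d%02d-capitalbikeshare-tripdata.csv"
--     pattern_201801 = input_dir_flow + "/%d%02d_capitalbikeshare_tripdata.csv"
--     year = start_year
--     while year <= end_year:
--         if year == start_year:
--             month = start_month
--         else:
--             month = 1
--         if year == end_year:
--             end = end_month
--         else:
--             end = 12
--         while month <= end:
--             if year == 2018 and month == 1: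
--                 res.append(pattern_201801 % (year, month))
--             else:
--                 res.append(pattern_month % (year, month))
--             month += 1
--         year += 1
--     return res
-- ===== SOURCE B (Python) =====
-- def get_data_url_month(input_dir_flow, start_year, start_month, end_year, end_month):
--     start = start_year * 12 + (start_month - 1)
--     stop = end_year * 12 + (end_month - 1)
--     if stop < start:
--         return []
--     if not (1 <= start_month <= 12 and 1 <= end_month <= 12):
--         raise ValueError("month must be in 1..12")
--     pattern = input_dir_flow + "/%d%02d%scapitalbikeshare%stripdata.csv"
--     res = []
--     for idx in range(start, stop + 1):
--         year, m = divmod(idx, 12)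
--         sep = "_" if idx == 2018 * 12 else "-"
--         res.append(pattern % (year, m + 1, sep, sep))
--     return res
-- ===== Notes on version B (the rewrite author's own statement) =====
-- stated objective: simpler
-- what changed: Replaces the nested year/month while loops and their per-year boundary conditionals by a single flat range over absolute month indices (year*12+month-1), recovering year and month with divmod and detecting the 2018-01 case by index; malformed months outside 1..12 are rejected with ValueError on non-empty ranges.
-- outside the precondition, e.g. on get_data_url_month('', 0, 0, 0, 0): A returns ['/000-capitalbikeshare-tripdata.csv'], B raises ValueError
import Mathlib
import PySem

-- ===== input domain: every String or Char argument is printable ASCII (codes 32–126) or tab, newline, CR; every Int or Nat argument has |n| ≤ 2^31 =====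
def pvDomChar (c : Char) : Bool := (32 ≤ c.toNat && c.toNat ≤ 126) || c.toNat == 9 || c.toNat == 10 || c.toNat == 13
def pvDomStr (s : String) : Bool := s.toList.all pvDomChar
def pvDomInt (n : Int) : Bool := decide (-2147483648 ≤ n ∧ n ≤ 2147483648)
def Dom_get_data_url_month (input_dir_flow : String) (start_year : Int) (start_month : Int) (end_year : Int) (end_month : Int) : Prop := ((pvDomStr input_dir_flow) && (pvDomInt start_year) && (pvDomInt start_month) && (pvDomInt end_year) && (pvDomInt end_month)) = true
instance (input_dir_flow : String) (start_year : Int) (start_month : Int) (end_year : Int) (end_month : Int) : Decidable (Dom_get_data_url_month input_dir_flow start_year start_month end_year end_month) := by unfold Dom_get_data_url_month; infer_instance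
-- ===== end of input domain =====

-- B replaces A's nested while loops and boundary conditionals by one flat pass over absolute
-- month indices (year*12+month-1), recovering year/month by divmod; objective: simpler.

-- ===== PORT A =====
-- '%02d' % m : pads with one '0' exactly when 0 ≤ m < 10 (negative ints already have width ≥ 2); exact on Int
def pvPad02 (m : Int) : String := if 0 ≤ m ∧ m < 10 then "0" ++ PySem.Int.toStr m else PySem.Int.toStr m

-- '(input + "/%d%02d<suffix>") % (y, m)' : substitutes the two fields and collapses '%%' in the
-- directory part to '%' (Python's %-scan); exact whenever Python's %-format returns (any other '%'
-- directive in the directory makes Python raise TypeError/ValueError, excluded by Pre_)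
def pvFmtA (input_dir_flow suffix : String) (y m : Int) : String :=
  PySem.Str.replace input_dir_flow "%%" "%" ++ "/" ++ PySem.Int.toStr y ++ pvPad02 m ++ suffix

-- inner 'while month <= end' loop of A
def pvAInner (input_dir_flow : String) (year month endm : Int) : List String :=
  if month ≤ endm then
    (if year = 2018 ∧ month = 1 then pvFmtA input_dir_flow "_capitalbikeshare_tripdata.csv" year month
     else pvFmtA input_dir_flow "-capitalbikeshare-tripdata.csv" year month)
      :: pvAInner input_dir_flow year (month + 1) endm
  else []
termination_by (endm + 1 - month).toNat
decreasing_by omega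

-- outer 'while year <= end_year' loop of A
def pvAOuter (input_dir_flow : String) (start_year start_month end_year end_month year : Int) : List String :=
  if year ≤ end_year then
    pvAInner input_dir_flow year (if year = start_year then start_month else 1)
      (if year = end_year then end_month else 12)
      ++ pvAOuter input_dir_flow start_year start_month end_year end_month (year + 1)
  else []
termination_by (end_year + 1 - year).toNat
decreasing_by omega

def get_data_url_month (input_dir_flow : String) (start_year : Int) (start_month : Int) (end_year : Int) (end_month : Int) : List String :=
  pvAOuter input_dir_flow start_year start_month end_year end_month start_year

-- ===== PORT B =====
-- B's loop body: 'pattern % (year, m+1, sep, sep)' after 'year, m = divmod(idx, 12)'; the same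
-- '%%'-collapse of the directory part as in A's pattern (B raises on other '%' directives too)
def pvIdxUrl (input_dir_flow : String) (idx : Int) : String :=
  let year := PySem.Int.floordiv idx 12
  let m := PySem.Int.mod idx 12
  let sep : String := if idx = 2018 * 12 then "_" else "-"
  PySem.Str.replace input_dir_flow "%%" "%" ++ "/" ++ PySem.Int.toStr year ++ pvPad02 (m + 1) ++ sep ++ "capitalbikeshare" ++ sep ++ "tripdata.csv"

-- B's ValueError on malformed months (non-empty range, a month outside 1..12) is a raise: those
-- inputs lie outside Pre_ below, and the port's value there is not claimed
def get_data_url_month_alt (input_dir_flow : String) (start_year : Int) (start_month : Int) (end_year : Int) (end_month : Int) : List String :=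
  let start := start_year * 12 + (start_month - 1)
  let stop := end_year * 12 + (end_month - 1)
  if stop < start then []
  else (PySem.List.pyRange start (stop + 1) 1).map (pvIdxUrl input_dir_flow)

-- ===== PRECONDITION & SPEC =====
-- Pre_ admits every empty year/month range (any month values; both programs return []) and otherwise
-- restricts the months to the calendar domain 1..12 (outside it A's loop-boundary handling of malformed
-- months is an accident of its nested loops and B raises ValueError) and excludes directories containing
-- '%' on non-empty ranges, which land inside the %-format pattern and make both programs raise
-- TypeError/ValueError (or, for '%%', collapse to '%' — a formatting artefact both share).
def Pre_get_data_url_month (input_dir_flow : String) (start_year : Int) (start_month : Int) (end_year : Int) (end_month : Int) : Prop :=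
  ((start_year = end_year ∧ end_month < start_month) ∨
   (end_year < start_year ∧ end_year * 12 + end_month < start_year * 12 + start_month)) ∨
  ((1 ≤ start_month ∧ start_month ≤ 12) ∧ (1 ≤ end_month ∧ end_month ≤ 12) ∧
   (end_year < start_year ∨ (start_year = end_year ∧ end_month < start_month) ∨
    input_dir_flow.toList.contains '%' = false))
instance (input_dir_flow : String) (start_year : Int) (start_month : Int) (end_year : Int) (end_month : Int) : Decidable (Pre_get_data_url_month input_dir_flow start_year start_month end_year end_month) := by unfold Pre_get_data_url_month; infer_instance

def pvWitness_get_data_url_month : String × Int × Int × Int × Int := ("raw_data", 2017, 6, 2018, 3)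

def Spec_get_data_url_month (input_dir_flow : String) (start_year : Int) (start_month : Int) (end_year : Int) (end_month : Int) (out : List String) : Prop := out = get_data_url_month_alt input_dir_flow start_year start_month end_year end_month
instance (input_dir_flow : String) (start_year : Int) (start_month : Int) (end_year : Int) (end_month : Int) (out : List String) : Decidable (Spec_get_data_url_month input_dir_flow start_year start_month end_year end_month out) := by unfold Spec_get_data_url_month; infer_instance

-- ===== CLAIM (what is proved, stated in full; the proofs are below) =====
def Claim_equal_get_data_url_month : Prop := ∀ (input_dir_flow : String) (start_year : Int) (start_month : Int) (end_year : Int) (end_month : Int), Dom_get_data_url_month input_dir_flow start_year start_month end_year end_month → Pre_get_data_url_month input_dir_flow start_year start_month end_year end_month → Spec_get_data_url_month input_dir_flow start_year start_month end_year end_month (get_data_url_month input_dir_flow start_year start_month end_year end_month)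

-- ===== LEMMAS AND PROOFS =====

-- the url B builds at index y*12+(m-1) is the url A builds for (y, m), for calendar months
theorem pvIdxUrl_eq (inp : String) (y m : Int) (h1 : 1 ≤ m) (h2 : m ≤ 12) :
    pvIdxUrl inp (y * 12 + (m - 1)) =
      (if y = 2018 ∧ m = 1 then pvFmtA inp "_capitalbikeshare_tripdata.csv" y m
       else pvFmtA inp "-capitalbikeshare-tripdata.csv" y m) := by
  have hdiv : PySem.Int.floordiv (y * 12 + (m - 1)) 12 = y := by
    rw [PySem.Int.floordiv_eq_iff_of_pos (by norm_num)]; omega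
  have hmod : PySem.Int.mod (y * 12 + (m - 1)) 12 = m - 1 := by
    have := PySem.Int.floordiv_mul_add_mod (y * 12 + (m - 1)) 12
    rw [hdiv] at this; omega
  have hidx : (y * 12 + (m - 1) = 2018 * 12) ↔ (y = 2018 ∧ m = 1) := by omega
  have h1' : ("_capitalbikeshare_tripdata.csv" : String) = "_" ++ "capitalbikeshare" ++ "_" ++ "tripdata.csv" := by decide
  have h2' : ("-capitalbikeshare-tripdata.csv" : String) = "-" ++ "capitalbikeshare" ++ "-" ++ "tripdata.csv" := by decide
  simp only [pvIdxUrl]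
  rw [hdiv, hmod, show m - 1 + 1 = m from by omega]
  by_cases h : y = 2018 ∧ m = 1
  · rw [if_pos (hidx.mpr h), if_pos h]
    simp [pvFmtA, h1', String.append_assoc]
  · rw [if_neg (fun hc => h (hidx.mp hc)), if_neg h]
    simp [pvFmtA, h2', String.append_assoc]

-- A's inner loop for year y over months m..e equals B's flat segment of indices
theorem pvInner_eq (inp : String) (y m e : Int) (hm : 1 ≤ m) (he : e ≤ 12) :
    pvAInner inp y m e = (PySem.List.pyRange (y * 12 + (m - 1)) (y * 12 + e) 1).map (pvIdxUrl inp) := by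
  rw [pvAInner]
  by_cases h : m ≤ e
  · rw [if_pos h, PySem.List.pyRange_one_cons (by omega), List.map_cons,
      pvIdxUrl_eq inp y m hm (by omega), pvInner_eq inp y (m + 1) e (by omega) he,
      show y * 12 + (m - 1) + 1 = y * 12 + (m + 1 - 1) by ring]
  · rw [if_neg h, show PySem.List.pyRange (y * 12 + (m - 1)) (y * 12 + e) 1 = [] from
      PySem.List.pyRange_one_eq_nil (by omega), List.map_nil]
termination_by (e + 1 - m).toNat
decreasing_by omega

-- A's outer loop from any year strictly after the first equals B's flat tail segment
theorem pvRest_eq (inp : String) (sy sm ey em : Int) (hem1 : 1 ≤ em) (hem2 : em ≤ 12) :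
    ∀ (n : ℕ) (y : Int), (ey + 1 - y).toNat = n → sy < y →
      pvAOuter inp sy sm ey em y =
        (PySem.List.pyRange (y * 12) (ey * 12 + em) 1).map (pvIdxUrl inp) := by
  intro n
  induction n with
  | zero =>
    intro y hn hy
    rw [pvAOuter, if_neg (by omega), show PySem.List.pyRange (y * 12) (ey * 12 + em) 1 = [] from
      PySem.List.pyRange_one_eq_nil (by omega), List.map_nil]
  | succ k ih =>
    intro y hn hy
    by_cases hle : y ≤ ey
    · rw [pvAOuter, if_pos hle, if_neg (by omega)]
      by_cases hey : y = ey
      · subst hey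
        rw [if_pos rfl, pvInner_eq inp y 1 em (le_refl 1) hem2,
          pvAOuter, if_neg (by omega), List.append_nil,
          show y * 12 + (1 - 1) = y * 12 by ring]
      · rw [if_neg hey, pvInner_eq inp y 1 12 (le_refl 1) (le_refl 12),
          ih (y + 1) (by omega) (by omega),
          show y * 12 + (1 - 1) = y * 12 by ring,
          PySem.List.pyRange_one_append (y * 12) ((y + 1) * 12) (ey * 12 + em)
            (by omega) (by omega), List.map_append,
          show y * 12 + 12 = (y + 1) * 12 by ring]
    · rw [pvAOuter, if_neg hle, show PySem.List.pyRange (y * 12) (ey * 12 + em) 1 = [] from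
        PySem.List.pyRange_one_eq_nil (by omega), List.map_nil]

-- ===== VERDICT (by name: the statement is the Claim_ definition above) =====
theorem get_data_url_month_spec : Claim_equal_get_data_url_month := by
  intro inp sy sm ey em _ hpre
  show get_data_url_month inp sy sm ey em = get_data_url_month_alt inp sy sm ey em
  unfold get_data_url_month get_data_url_month_alt
  simp only []
  rcases hpre with (⟨heq, hlt⟩ | ⟨hlt, hidx⟩) | ⟨⟨hsm1, hsm2⟩, ⟨hem1, hem2⟩, hdisj⟩
  · -- empty range within one year: both produce []
    subst heq
    rw [pvAOuter, if_pos (le_refl sy), if_pos rfl, if_pos rfl, pvAInner, if_neg (by omega),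
      pvAOuter, if_neg (by omega), List.append_nil, if_pos (by omega)]
  · -- empty year range: both produce []
    rw [pvAOuter, if_neg (by omega), if_pos (by omega)]
  · -- calendar months: the nested loops linearise to the flat index range
    by_cases hgt : ey < sy
    · rw [pvAOuter, if_neg (by omega), if_pos (by omega)]
    · by_cases heq : sy = ey
      · subst heq
        by_cases hme : em < sm
        · rw [pvAOuter, if_pos (le_refl sy), if_pos rfl, if_pos rfl, pvAInner, if_neg (by omega),
            pvAOuter, if_neg (by omega), List.append_nil, if_pos (by omega)]
        · rw [if_neg (by omega), pvAOuter, if_pos (le_refl sy), if_pos rfl, if_pos rfl,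
            pvInner_eq inp sy sm em hsm1 hem2, pvAOuter, if_neg (by omega), List.append_nil,
            show sy * 12 + (em - 1) + 1 = sy * 12 + em by ring]
      · rw [if_neg (by omega), pvAOuter, if_pos (by omega), if_pos rfl, if_neg heq,
          pvInner_eq inp sy sm 12 hsm1 (le_refl 12),
          pvRest_eq inp sy sm ey em hem1 hem2 (ey + 1 - (sy + 1)).toNat (sy + 1) rfl (by omega),
          PySem.List.pyRange_one_append (sy * 12 + (sm - 1)) ((sy + 1) * 12) (ey * 12 + (em - 1) + 1)
            (by omega) (by omega), List.map_append,
          show sy * 12 + 12 = (sy + 1) * 12 by ring,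
          show ey * 12 + (em - 1) + 1 = ey * 12 + em by ring]
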